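-- pv_equiv track=rewrite | github.com/engenmt/permpy | src/permpy/misc.py | num_value_blocks
-- ===== SOURCE A (Python) =====
-- def num_value_blocks(L):
--     if len(L) == 0:
--         return 0
--     L = sorted(list(L))
--     n = 1
--     for i in range(len(L) - 1):
--         if L[i] + 1 not in L:
--             n += 1
--     return n
-- ===== SOURCE B (Python) =====
-- def num_value_blocks(L):
--     M = sorted(L)
--     total = 0
--     i = 0
--     n = len(M)
--     while i < n:
--         x = M[i]
--         j = i
--         while j < n and M[j] == x:
--             j += 1
--         # run of equal values M[i:j]; it ends a block unless the next
--         # distinct value is exactly x + 1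
--         if j == n or M[j] != x + 1:
--             total += j - i
--         i = j
--     return total
-- ===== Notes on version B (the rewrite author's own statement) =====
-- stated objective: faster
-- what changed: B replaces A's per-index 'x+1 in L' linear membership scans by a sort followed by a single run-length pass: it groups equal values into runs and adds a run's length exactly when the next distinct value is not the successor, using sortedness/adjacency instead of any membership test.
import Mathlib
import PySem

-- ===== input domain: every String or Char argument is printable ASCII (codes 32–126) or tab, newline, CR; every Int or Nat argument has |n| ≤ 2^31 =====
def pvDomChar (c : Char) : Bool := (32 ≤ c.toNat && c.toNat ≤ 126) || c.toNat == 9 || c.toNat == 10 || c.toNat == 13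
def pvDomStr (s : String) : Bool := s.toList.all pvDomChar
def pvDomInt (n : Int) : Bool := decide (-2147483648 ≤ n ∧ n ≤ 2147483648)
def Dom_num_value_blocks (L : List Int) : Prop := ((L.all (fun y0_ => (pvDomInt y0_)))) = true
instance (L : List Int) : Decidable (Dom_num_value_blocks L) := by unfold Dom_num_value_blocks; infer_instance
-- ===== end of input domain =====

-- B replaces A's per-index linear membership scans by a sort plus one run-length
-- pass over adjacent runs of equal values; same return value on every input.

-- ===== PORT A =====
def num_value_blocks (L : List Int) : Int :=
  if L.length = 0 then 0
  else
    let Ls := PySem.List.sorted L (fun x => x) false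
    (PySem.List.pyRange 0 ((Ls.length : Int) - 1) 1).foldl
      (fun n i => if PySem.List.pyGetD Ls i 0 + 1 ∈ Ls then n else n + 1) 1

-- ===== PORT B =====
-- B's inner while loop advances j over the run of values equal to x; ported as
-- takeWhile/dropWhile (the run and the remainder), then recursion continues at
-- the remainder exactly as B's outer while loop continues at i = j.
def nvbGo (M : List Int) : Int :=
  match M with
  | [] => 0
  | x :: t =>
    let run := t.takeWhile (fun y => y == x)
    let rest := t.dropWhile (fun y => y == x)
    (if rest.head? = some (x + 1) then 0 else (1 + run.length : Int)) + nvbGo rest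
termination_by M.length
decreasing_by
  simp only [List.length_cons]
  exact Nat.lt_succ_of_le (List.length_dropWhile_le _ _)

def num_value_blocks_alt (L : List Int) : Int :=
  nvbGo (PySem.List.sorted L (fun x => x) false)

-- ===== PRECONDITION & SPEC =====
def Spec_num_value_blocks (L : List Int) (out : Int) : Prop := out = num_value_blocks_alt L
instance (L : List Int) (out : Int) : Decidable (Spec_num_value_blocks L out) := by unfold Spec_num_value_blocks; infer_instance

-- ===== CLAIM (what is proved, stated in full; the proofs are below) =====
def Claim_equal_num_value_blocks : Prop := ∀ (L : List Int), Dom_num_value_blocks L → Spec_num_value_blocks L (num_value_blocks L)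

-- ===== LEMMAS AND PROOFS =====

-- a "count the elements failing p" fold is a countP
theorem fold_count (M : List Int) (p : Int → Prop) [DecidablePred p] (n : Int) :
    M.foldl (fun n x => if p x then n else n + 1) n
      = n + ((M.countP (fun x => decide ¬ p x) : Nat) : Int) := by
  induction M generalizing n with
  | nil => simp
  | cons x t ih =>
    by_cases hp : p x <;> simp [List.countP_cons, hp, ih] <;> push_cast <;> ring

-- in a ≤-pairwise-sorted nonempty list, last+1 is not a member
theorem last_succ_not_mem (M : List Int) (h : M.Pairwise (· ≤ ·)) (x : Int)
    (hx : M = M.dropLast ++ [x]) : x + 1 ∉ M := by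
  intro hmem
  rw [hx] at hmem h
  rcases List.mem_append.1 hmem with h1 | h1
  · have := (List.pairwise_append.1 h).2.2 _ h1 x (by simp)
    omega
  · simp at h1

-- A's loop over indices 0..len-2 of a nonempty list M counts, over all of M,
-- the elements whose successor is absent (the dropped last element always counts)
theorem loopA (M : List Int) (hMne : M ≠ []) (hpair : M.Pairwise (· ≤ ·)) :
    (PySem.List.pyRange 0 ((M.length : Int) - 1) 1).foldl
        (fun n i => if PySem.List.pyGetD M i 0 + 1 ∈ M then n else n + 1) 1
      = ((M.countP (fun x => decide ¬ (x + 1 ∈ M)) : Nat) : Int) := by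
  have hpos : 0 < M.length := List.length_pos_iff.2 hMne
  have hlen : (M.length : Int) - 1 = (M.dropLast.length : Int) := by
    simp [List.length_dropLast]; omega
  have hfold :
      (PySem.List.pyRange 0 ((M.length : Int) - 1) 1).foldl
          (fun n i => if PySem.List.pyGetD M i 0 + 1 ∈ M then n else n + 1) (1 : Int)
        = M.dropLast.foldl (fun n x => if x + 1 ∈ M then n else n + 1) (1 : Int) := by
    rw [hlen]
    rw [PySem.List.foldl_congr_mem
      (g := fun n i => if PySem.List.pyGetD M.dropLast i 0 + 1 ∈ M then n else n + 1)]
    · exact PySem.List.foldl_pyRange_zero_pyGetD' M.dropLast 0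
        (fun n x => if x + 1 ∈ M then n else n + 1) 1
    · intro acc i hi
      have hi' := (PySem.List.mem_pyRange_one).1 hi
      have h1 : PySem.List.pyGetD M i 0 = PySem.List.pyGetD M.dropLast i 0 := by
        have hnat : i.toNat < M.dropLast.length := by
          simp [List.length_dropLast]; omega
        have hnat' : i.toNat < M.length := by
          simp [List.length_dropLast] at hnat; omega
        rw [show i = (i.toNat : Int) by omega,
            PySem.List.pyGetD_natCast, PySem.List.pyGetD_natCast,
            List.getD_eq_getElem _ _ hnat', List.getD_eq_getElem _ _ hnat]
        exact (List.getElem_dropLast hnat).symm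
      rw [h1]
  refine hfold.trans ?_
  rw [fold_count]
  obtain ⟨x, hx⟩ : ∃ x, M = M.dropLast ++ [x] :=
    ⟨M.getLast hMne, (List.dropLast_append_getLast hMne).symm⟩
  have hlast : x + 1 ∉ M := last_succ_not_mem M hpair x hx
  have hx1 : List.countP (fun y => decide ¬ (y + 1 ∈ M)) [x] = 1 := by
    simp [hlast]
  set p : Int → Bool := fun y => decide ¬ (y + 1 ∈ M) with hp
  calc 1 + ((List.countP p M.dropLast : Nat) : Int)
      = ((List.countP p M.dropLast + List.countP p [x] : Nat) : Int) := by
        rw [hx1]; push_cast; ring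
    _ = ((List.countP p (M.dropLast ++ [x]) : Nat) : Int) := by
        rw [List.countP_append]
    _ = ((List.countP p M : Nat) : Int) := by rw [← hx]

theorem num_value_blocks_eq_countP (L : List Int) :
    num_value_blocks L
      = ((PySem.List.sorted L (fun x => x) false).countP
          (fun x => decide ¬ (x + 1 ∈ PySem.List.sorted L (fun x => x) false)) : Nat) := by
  unfold num_value_blocks
  by_cases hL : L.length = 0
  · simp [List.length_eq_zero_iff.1 hL, PySem.List.sorted]
  · rw [if_neg hL]
    have hMne : PySem.List.sorted L (fun x => x) false ≠ [] := by
      intro h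
      have := (PySem.List.sorted_perm L (fun x => x) false).length_eq
      rw [h] at this
      exact hL this.symm
    exact loopA _ hMne (by simpa using PySem.List.sorted_pairwise L (fun x => x))

-- the first element left by dropWhile fails the predicate
theorem dropWhile_head_not (p : Int → Bool) (l : List Int) (x : Int) (xs : List Int)
    (h : l.dropWhile p = x :: xs) : ¬ p x = true := by
  induction l with
  | nil => simp [List.dropWhile] at h
  | cons a t ih =>
    by_cases hp : p a
    · simp [List.dropWhile, hp] at h; exact ih h
    · simp [List.dropWhile, hp] at h; cases h.1; exact hp

-- B's run-length scan of a sorted list also counts the elements whose successor is absent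
theorem nvbGo_eq_countP (M : List Int) (hpair : M.Pairwise (· ≤ ·)) :
    nvbGo M = ((M.countP (fun x => decide ¬ (x + 1 ∈ M)) : Nat) : Int) := by
  induction hn : M.length using Nat.strong_induction_on generalizing M with
  | _ n ih =>
  cases M with
  | nil => simp [nvbGo]
  | cons x t =>
    have hsplit : t.takeWhile (fun y => y == x) ++ t.dropWhile (fun y => y == x) = t :=
      List.takeWhile_append_dropWhile
    have hxle : ∀ y ∈ t, x ≤ y := (List.pairwise_cons.1 hpair).1
    have hrest_pair : (t.dropWhile (fun y => y == x)).Pairwise (· ≤ ·) :=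
      hpair.sublist ((List.dropWhile_sublist (fun y => y == x)).trans (List.sublist_cons_self x t))
    have hrun_eq : ∀ y ∈ t.takeWhile (fun y => y == x), y = x := by
      intro y hy; simpa using List.mem_takeWhile_imp hy
    have hlen_rest : (t.dropWhile (fun y => y == x)).length < n := by
      have h1 := List.length_dropWhile_le (fun y => y == x) t
      simp only [List.length_cons] at hn; omega
    have ihrest := ih _ hlen_rest (t.dropWhile (fun y => y == x)) hrest_pair rfl
    rw [nvbGo]
    cases hrest : t.dropWhile (fun y => y == x) with
    | nil =>
      have ht : t.takeWhile (fun y => y == x) = t := by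
        conv_rhs => rw [← hsplit, hrest]
        rw [List.append_nil]
      have hall : ∀ z ∈ x :: t, z = x := by
        intro z hz
        rcases List.mem_cons.1 hz with h | h
        · exact h
        · exact hrun_eq z (by rw [ht]; exact h)
      have hnotmem : (x + 1) ∉ x :: t := by
        intro h; have := hall _ h; omega
      have hcount : (x :: t).countP (fun y => decide ¬ (y + 1 ∈ x :: t)) = (x :: t).length := by
        apply List.countP_eq_length.2
        intro y hy
        have hyx := hall y hy
        subst hyx
        simpa using hnotmem
      rw [hcount]
      simp [nvbGo, ht]
      push_cast; ring
    | cons h0 r =>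
      have hh0 : ¬ (h0 == x) = true := dropWhile_head_not _ t h0 r hrest
      have hh0t : h0 ∈ t := (List.dropWhile_sublist (fun y => y == x)).mem (hrest ▸ List.mem_cons_self ..)
      have hh0x : x < h0 := by
        have := hxle h0 hh0t
        have : h0 ≠ x := by simpa using hh0
        omega
      have hh0le : ∀ y ∈ h0 :: r, h0 ≤ y := by
        intro y hy
        rcases List.mem_cons.1 hy with h | h
        · omega
        · exact (List.pairwise_cons.1 (hrest ▸ hrest_pair)).1 y h
      have key1 : (x + 1 ∈ x :: t) ↔ h0 = x + 1 := by
        constructor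
        · intro h
          rcases List.mem_cons.1 h with h | h
          · omega
          · rw [← hsplit, List.mem_append, hrest] at h
            rcases h with h | h
            · have := hrun_eq _ h; omega
            · have := hh0le _ h; omega
        · intro h
          exact List.mem_cons_of_mem x (h ▸ hh0t)
      have key2 : ∀ y ∈ (h0 :: r),
          ((y + 1 ∈ x :: t) ↔ y + 1 ∈ (h0 :: r)) := by
        intro y hy
        have hy0 : h0 ≤ y := hh0le y hy
        constructor
        · intro h
          rcases List.mem_cons.1 h with h | h
          · omega
          · rw [← hsplit, List.mem_append, hrest] at h
            rcases h with h | h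
            · have := hrun_eq _ h; omega
            · exact h
        · intro h
          have : y + 1 ∈ t := by
            rw [← hsplit, hrest]
            exact List.mem_append_right _ h
          exact List.mem_cons_of_mem x this
      have ht : t = t.takeWhile (fun y => y == x) ++ (h0 :: r) := by
        rw [← hrest]; exact hsplit.symm
      have hlist : x :: t = (x :: t.takeWhile (fun y => y == x)) ++ (h0 :: r) := by
        rw [List.cons_append, ← ht]
      have hcsplit := congrArg (List.countP (fun y => decide ¬ (y + 1 ∈ x :: t))) hlist
      rw [List.countP_append] at hcsplit
      have hcrun : (x :: t.takeWhile (fun y => y == x)).countP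
          (fun y => decide ¬ (y + 1 ∈ x :: t))
          = if h0 = x + 1 then 0 else (t.takeWhile (fun y => y == x)).length + 1 := by
        by_cases hc : h0 = x + 1
        · rw [if_pos hc]
          apply List.countP_eq_zero.2
          intro y hy
          rcases List.mem_cons.1 hy with h | h
          · subst h; simp [key1.2 hc]
          · have := hrun_eq _ h; subst this; simp [key1.2 hc]
        · rw [if_neg hc]
          have hnm : (x + 1) ∉ x :: t := fun h => hc (key1.1 h)
          have hTrue : ∀ y ∈ x :: t.takeWhile (fun y => y == x),
              (fun y => decide ¬ (y + 1 ∈ x :: t)) y = true := by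
            intro y hy
            rcases List.mem_cons.1 hy with h | h
            · subst h; simpa using hnm
            · have := hrun_eq _ h; subst this; simpa using hnm
          rw [List.countP_eq_length.2 hTrue]
          simp
      have hcrest : (h0 :: r).countP (fun y => decide ¬ (y + 1 ∈ x :: t))
          = (h0 :: r).countP (fun y => decide ¬ (y + 1 ∈ (h0 :: r))) := by
        refine List.countP_congr (fun y hy => ?_)
        simp [key2 y hy]
      rw [hrest] at ihrest
      rw [hcsplit, hcrun, hcrest]
      simp only [List.head?_cons]
      have hif : ((some h0 = some (x + 1)) ↔ h0 = x + 1) := by simp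
      by_cases hc : h0 = x + 1
      · rw [if_pos (by simp [hc]), if_pos hc, ihrest]
        push_cast; ring
      · rw [if_neg (by simp [hc]), if_neg hc, ihrest]
        push_cast; ring

theorem num_value_blocks_alt_eq_countP (L : List Int) :
    num_value_blocks_alt L
      = ((PySem.List.sorted L (fun x => x) false).countP
          (fun x => decide ¬ (x + 1 ∈ PySem.List.sorted L (fun x => x) false)) : Nat) := by
  unfold num_value_blocks_alt
  exact nvbGo_eq_countP _ (by simpa using PySem.List.sorted_pairwise L (fun x => x))

-- ===== VERDICT (by name: the statement is the Claim_ definition above) =====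
theorem num_value_blocks_spec : Claim_equal_num_value_blocks := by
  intro L _
  unfold Spec_num_value_blocks
  rw [num_value_blocks_eq_countP, num_value_blocks_alt_eq_countP]
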